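-- pv_equiv track=rewrite | github.com/JetBrains-Research/pubtrends | pysrc/papers/analysis/text.py | _build_stems_to_tokens_map
-- ===== SOURCE A (Python) =====
-- def _build_stems_to_tokens_map(stems_and_tokens):
--     """ Build a map to substitute each stem with the shortest word if word is different """
--     stems_tokens_map = {}
--     for stem, token in stems_and_tokens:
--         if stem != token:  # Ignore tokens similar to stems
--             if stem in stems_tokens_map:
--                 if len(stems_tokens_map[stem]) > len(token):
--                     stems_tokens_map[stem] = token
--             else:
--                 stems_tokens_map[stem] = token
--     return stems_tokens_map
-- ===== SOURCE B (Python) =====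
-- def _build_stems_to_tokens_map(stems_and_tokens):
--     """ Build a map to substitute each stem with the shortest word if word is different """
--     groups = {}
--     for stem, token in stems_and_tokens:
--         if stem != token:
--             groups.setdefault(stem, []).append(token)
--     # min with key=len returns the FIRST shortest token, matching the streaming
--     # strict '>' update (earliest token wins ties).
--     return {stem: min(tokens, key=len) for stem, tokens in groups.items()}
-- ===== Notes on version B (the rewrite author's own statement) =====
-- stated objective: alternative
-- what changed: Replaces the streaming keep-the-shorter dict update with an index-then-reduce structure: one pass groups every differing token by stem, a second pass takes min(tokens, key=len) per stem.
import Mathlib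
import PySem

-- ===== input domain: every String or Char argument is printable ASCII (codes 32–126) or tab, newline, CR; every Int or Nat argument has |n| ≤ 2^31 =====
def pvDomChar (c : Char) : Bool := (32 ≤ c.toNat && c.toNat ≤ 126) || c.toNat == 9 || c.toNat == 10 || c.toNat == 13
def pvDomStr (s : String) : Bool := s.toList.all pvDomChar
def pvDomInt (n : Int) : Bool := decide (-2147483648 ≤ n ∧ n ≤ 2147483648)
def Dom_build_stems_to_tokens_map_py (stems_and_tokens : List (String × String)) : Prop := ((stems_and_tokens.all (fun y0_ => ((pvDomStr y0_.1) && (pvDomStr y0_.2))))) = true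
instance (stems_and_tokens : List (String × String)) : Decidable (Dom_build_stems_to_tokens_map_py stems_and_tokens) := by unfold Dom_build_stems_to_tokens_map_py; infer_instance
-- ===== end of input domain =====

-- B replaces A's streaming keep-the-shorter dict update with an index-then-reduce
-- structure (group all differing tokens per stem, then take the first shortest per
-- group); objective: alternative decomposition, same cost.

-- ===== PORT A =====
-- one iteration of A's for-loop body (stem = p.1, token = p.2)
def pvStepA (d : PySem.Dict String String) (p : String × String) : PySem.Dict String String :=
  if p.1 ≠ p.2 then
    if d.contains p.1 then
      if PySem.Str.len (d.getD p.1 "") > PySem.Str.len p.2 then d.insert p.1 p.2 else d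
    else d.insert p.1 p.2
  else d

def build_stems_to_tokens_map_py (stems_and_tokens : List (String × String)) : List (String × String) :=
  (stems_and_tokens.foldl pvStepA PySem.Dict.empty).items

-- ===== PORT B =====
-- one iteration of B's grouping loop: groups.setdefault(stem, []).append(token)
def pvStepB (g : PySem.Dict String (List String)) (p : String × String) : PySem.Dict String (List String) :=
  if p.1 ≠ p.2 then g.modify p.1 [] (· ++ [p.2]) else g

-- min(tokens, key=len) (tokens is never empty where B evaluates it)
def pvMinTok (v : List String) : String :=
  (PySem.List.min? v PySem.Str.len).getD ""

def build_stems_to_tokens_map_py_alt (stems_and_tokens : List (String × String)) : List (String × String) :=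
  ((stems_and_tokens.foldl pvStepB PySem.Dict.empty).items).map (fun kv => (kv.1, pvMinTok kv.2))

-- ===== PRECONDITION & SPEC =====
def Spec_build_stems_to_tokens_map_py (stems_and_tokens : List (String × String)) (out : List (String × String)) : Prop := out = build_stems_to_tokens_map_py_alt stems_and_tokens
instance (stems_and_tokens : List (String × String)) (out : List (String × String)) : Decidable (Spec_build_stems_to_tokens_map_py stems_and_tokens out) := by unfold Spec_build_stems_to_tokens_map_py; infer_instance

-- ===== CLAIM (what is proved, stated in full; the proofs are below) =====
def Claim_equal_build_stems_to_tokens_map_py : Prop := ∀ (stems_and_tokens : List (String × String)), Dom_build_stems_to_tokens_map_py stems_and_tokens → Spec_build_stems_to_tokens_map_py stems_and_tokens (build_stems_to_tokens_map_py stems_and_tokens)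

-- ===== LEMMAS AND PROOFS =====

-- the invariant tying A's streaming dict to B's group dict
def pvInv (g : PySem.Dict String (List String)) (d : PySem.Dict String String) : Prop :=
  d.items = g.items.map (fun kv => (kv.1, pvMinTok kv.2)) ∧
  g.keys.Nodup ∧
  ∀ kv ∈ g.items, kv.2 ≠ []

lemma pvMinTok_singleton (t : String) : pvMinTok [t] = t := by
  simp [pvMinTok, PySem.List.min?]

lemma pvMinTok_append (v : List String) (t : String) (hv : v ≠ []) :
    pvMinTok (v ++ [t]) =
      if PySem.Str.len t < PySem.Str.len (pvMinTok v) then t else pvMinTok v := by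
  obtain ⟨m, hm⟩ : ∃ m, PySem.List.min? v PySem.Str.len = some m := by
    rcases h : PySem.List.min? v PySem.Str.len with _ | m
    · exact absurd ((PySem.List.min?_eq_none_iff _ _).mp h) hv
    · exact ⟨m, rfl⟩
  simp only [pvMinTok, PySem.List.min?, List.foldl_append] at *
  rw [hm]
  simp only [List.foldl, Option.getD_some]
  split_ifs <;> rfl

lemma pvEntry_unique (g : PySem.Dict String (List String)) (h2 : g.keys.Nodup)
    {k : String} {v w : List String} (hv : (k, v) ∈ g.items) (hw : (k, w) ∈ g.items) : v = w := by
  have e1 := PySem.Dict.get?_of_mem_items g hv h2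
  have e2 := PySem.Dict.get?_of_mem_items g hw h2
  rw [e1] at e2
  exact Option.some.inj e2

lemma pvStep_inv (g : PySem.Dict String (List String)) (d : PySem.Dict String String)
    (h : pvInv g d) (p : String × String) : pvInv (pvStepB g p) (pvStepA d p) := by
  obtain ⟨h1, h2, h3⟩ := h
  have hdkeys : d.keys = g.keys := by
    show d.items.map (·.1) = g.items.map (·.1)
    rw [h1, List.map_map]; rfl
  have hcont : d.contains p.1 = g.contains p.1 := by
    rw [PySem.Dict.contains_eq_decide_mem_keys, PySem.Dict.contains_eq_decide_mem_keys, hdkeys]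
  by_cases hne : p.1 = p.2
  · simpa [pvStepA, pvStepB, hne] using ⟨h1, h2, h3⟩
  · by_cases hc : g.contains p.1 = true
    · -- stem already present: B appends to its group, A keeps the shorter of the two
      obtain ⟨v, hv⟩ : ∃ v, (p.1, v) ∈ g.items := by
        have hmem : p.1 ∈ g.keys := (PySem.Dict.contains_iff_mem_keys g p.1).mp hc
        obtain ⟨kv, hkv, he⟩ := List.mem_map.mp hmem
        refine ⟨kv.2, ?_⟩
        have hkv' : (kv.1, kv.2) ∈ g.items := by simpa using hkv
        rwa [he] at hkv'
      have hvne : v ≠ [] := h3 _ hv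
      have hdv : (p.1, pvMinTok v) ∈ d.items := by
        rw [h1]; exact List.mem_map.mpr ⟨(p.1, v), hv, rfl⟩
      have hdnd : d.keys.Nodup := by rw [hdkeys]; exact h2
      have hcur : d.getD p.1 "" = pvMinTok v := PySem.Dict.getD_of_mem_items d hdv hdnd ""
      have hgv : g.getD p.1 [] = v := PySem.Dict.getD_of_mem_items g hv h2 []
      have hdc : d.contains p.1 = true := by rw [hcont]; exact hc
      have hBitems : (pvStepB g p).items =
          g.items.map (fun q => if q.1 == p.1 then (p.1, v ++ [p.2]) else q) := by
        simp only [pvStepB, PySem.Dict.modify, hne, ne_eq, not_false_iff, if_pos, hgv]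
        have : g.contains p.1 = true := hc
        rw [PySem.Dict.items_insert_of_contains _ _ this]
      refine ⟨?_, ?_, ?_⟩
      · -- items relation
        by_cases hlt : PySem.Str.len p.2 < PySem.Str.len (pvMinTok v)
        · have hAitems : (pvStepA d p).items =
              d.items.map (fun q => if q.1 == p.1 then (p.1, p.2) else q) := by
            simp only [pvStepA, hne, ne_eq, not_false_iff, if_true, hdc, hcur]
            rw [if_pos hlt, PySem.Dict.items_insert_of_contains _ _ hdc]
          rw [hAitems, hBitems, h1, List.map_map, List.map_map]
          refine List.map_congr_left (fun q hq => ?_)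
          by_cases hqk : q.1 = p.1
          · have hq2 : q.2 = v := pvEntry_unique g h2 (by rwa [← hqk, Prod.mk.eta]) hv
            simp only [Function.comp, hqk, beq_self_eq_true, if_true, hq2,
              pvMinTok_append v p.2 hvne]
            rw [if_pos hlt]
          · simp [Function.comp, hqk]
        · have hAitems : (pvStepA d p) = d := by
            simp only [pvStepA, hne, ne_eq, not_false_iff, if_true, hdc, hcur]
            rw [if_neg hlt]
          rw [hAitems, hBitems, h1, List.map_map]
          refine List.map_congr_left (fun q hq => ?_)
          by_cases hqk : q.1 = p.1
          · have hq2 : q.2 = v := pvEntry_unique g h2 (by rwa [← hqk, Prod.mk.eta]) hv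
            simp only [Function.comp, hqk, beq_self_eq_true, if_true, hq2,
              pvMinTok_append v p.2 hvne]
            rw [if_neg hlt]
          · simp [Function.comp, hqk]
      · -- keys stay the same (overwrite in place)
        have : (pvStepB g p).keys = g.keys := by
          show (pvStepB g p).items.map (·.1) = g.items.map (·.1)
          rw [hBitems, List.map_map]
          refine List.map_congr_left (fun q hq => ?_)
          by_cases hqk : q.1 = p.1 <;> simp [Function.comp, hqk]
        rw [this]; exact h2
      · -- groups stay nonempty
        intro kv hkv
        rw [hBitems] at hkv
        obtain ⟨q, hq, he⟩ := List.mem_map.mp hkv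
        by_cases hqk : q.1 = p.1
        · simp only [hqk, beq_self_eq_true, if_true] at he
          rw [← he]; simp
        · rw [if_neg (by simpa using hqk)] at he
          rw [← he]; exact h3 q hq
    · -- fresh stem: both sides append a new entry
      have hc' : g.contains p.1 = false := by simpa using hc
      have hdc : d.contains p.1 = false := by rw [hcont]; exact hc'
      have hAitems : (pvStepA d p).items = d.items ++ [(p.1, p.2)] := by
        simp only [pvStepA, hne, ne_eq, not_false_iff, if_true, hdc, Bool.false_eq_true, if_false]
        exact PySem.Dict.items_insert_of_not_contains d _ hdc
      have hgd : g.getD p.1 [] = [] := PySem.Dict.getD_of_not_contains g [] hc'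
      have hBitems : (pvStepB g p).items = g.items ++ [(p.1, [p.2])] := by
        simp only [pvStepB, PySem.Dict.modify, hne, ne_eq, not_false_iff, if_true, hgd,
          List.nil_append]
        exact PySem.Dict.items_insert_of_not_contains g _ hc'
      refine ⟨?_, ?_, ?_⟩
      · rw [hAitems, hBitems, List.map_append, h1, List.map_singleton, pvMinTok_singleton]
      · have hk : (pvStepB g p).keys = g.keys ++ [p.1] := by
          show (pvStepB g p).items.map (·.1) = _
          rw [hBitems, List.map_append]; rfl
        rw [hk, List.nodup_append]
        have hnot : p.1 ∉ g.keys := fun hmem => by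
          rw [(PySem.Dict.contains_iff_mem_keys g p.1).mpr hmem] at hc'
          simp at hc'
        refine ⟨h2, List.nodup_singleton _, fun a ha b hb heq => ?_⟩
        exact hnot (by rw [← List.mem_singleton.mp hb, ← heq]; exact ha)
      · intro kv hkv
        rw [hBitems] at hkv
        rcases List.mem_append.mp hkv with hkv | hkv
        · exact h3 kv hkv
        · have : kv = (p.1, [p.2]) := by simpa using hkv
          rw [this]; simp

lemma pvFold_inv (l : List (String × String)) (g : PySem.Dict String (List String))
    (d : PySem.Dict String String) (h : pvInv g d) :
    pvInv (l.foldl pvStepB g) (l.foldl pvStepA d) := by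
  induction l generalizing g d with
  | nil => exact h
  | cons p t ih => exact ih _ _ (pvStep_inv g d h p)

-- ===== VERDICT (by name: the statement is the Claim_ definition above) =====
theorem build_stems_to_tokens_map_py_spec : Claim_equal_build_stems_to_tokens_map_py := by
  intro xs _
  have h := pvFold_inv xs PySem.Dict.empty PySem.Dict.empty
    ⟨rfl, PySem.Dict.nodup_keys_empty, by simp [PySem.Dict.empty]⟩
  exact h.1
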